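-- pv_equiv track=rewrite | github.com/zhiyu-deep/ZhiLight | tests/stream_web_demo.py | build_multi_frame_page
-- ===== SOURCE A (Python) =====
-- def build_multi_frame_page(row, col, query):
--     page = "<html><title>Stream Generator Demo</title><body>" \
--            "<table style='width:100%; height: 100%'>"
--     for r in range(row):
--         page += "<tr>"
--         for c in range(col):
--             page += f"<td><iframe src='/?{query}' style='width:100%; height: 100%'></iframe></td>"
--         page += "</tr>\n"
--     return page + "</table></body></html>"
-- ===== SOURCE B (Python) =====
-- def build_multi_frame_page(row, col, query):
--     cell = f"<td><iframe src='/?{query}' style='width:100%; height: 100%'></iframe></td>"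
--     row_html = "<tr>" + cell * col + "</tr>\n"
--     return ("<html><title>Stream Generator Demo</title><body>"
--             "<table style='width:100%; height: 100%'>"
--             + row_html * row
--             + "</table></body></html>")
-- ===== Notes on version B (the rewrite author's own statement) =====
-- stated objective: simpler
-- what changed: The nested loops with repeated += are replaced by computing one cell string and one row string and expressing the repetition with string multiplication (cell*col, row_html*row); no loops remain.
import Mathlib
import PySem

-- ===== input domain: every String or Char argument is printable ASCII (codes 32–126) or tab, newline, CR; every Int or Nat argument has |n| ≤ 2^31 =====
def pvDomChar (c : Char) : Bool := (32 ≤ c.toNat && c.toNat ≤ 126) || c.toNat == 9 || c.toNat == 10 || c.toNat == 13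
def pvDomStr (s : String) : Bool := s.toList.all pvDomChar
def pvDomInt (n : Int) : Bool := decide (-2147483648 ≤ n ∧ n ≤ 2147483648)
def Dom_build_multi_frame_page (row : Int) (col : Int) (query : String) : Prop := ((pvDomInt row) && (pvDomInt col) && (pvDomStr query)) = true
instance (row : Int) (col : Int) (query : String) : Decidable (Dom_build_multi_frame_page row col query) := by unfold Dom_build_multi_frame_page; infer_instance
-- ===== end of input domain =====

-- B replaces the two nested accumulation loops by one cell string and one row string
-- repeated with string multiplication (simpler; same output byte for byte).

-- ===== PORT A =====
def build_multi_frame_page (row : Int) (col : Int) (query : String) : String :=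
  let page := "<html><title>Stream Generator Demo</title><body><table style='width:100%; height: 100%'>"
  let page := (PySem.List.pyRange 0 row 1).foldl (fun page _ =>
    let page := page ++ "<tr>"
    let page := (PySem.List.pyRange 0 col 1).foldl (fun page _ =>
      page ++ ("<td><iframe src='/?" ++ query ++ "' style='width:100%; height: 100%'></iframe></td>")) page
    page ++ "</tr>\n") page
  page ++ "</table></body></html>"

-- ===== PORT B =====
-- Python's 's * n' (empty for n ≤ 0)
def strRep (s : String) : Nat → String
  | 0 => ""
  | n + 1 => s ++ strRep s n

def strMul (s : String) (n : Int) : String := strRep s n.toNat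

def build_multi_frame_page_alt (row : Int) (col : Int) (query : String) : String :=
  let cell := "<td><iframe src='/?" ++ query ++ "' style='width:100%; height: 100%'></iframe></td>"
  let row_html := "<tr>" ++ strMul cell col ++ "</tr>\n"
  "<html><title>Stream Generator Demo</title><body><table style='width:100%; height: 100%'>"
    ++ strMul row_html row
    ++ "</table></body></html>"

-- ===== PRECONDITION & SPEC =====
def Spec_build_multi_frame_page (row : Int) (col : Int) (query : String) (out : String) : Prop := out = build_multi_frame_page_alt row col query
instance (row : Int) (col : Int) (query : String) (out : String) : Decidable (Spec_build_multi_frame_page row col query out) := by unfold Spec_build_multi_frame_page; infer_instance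

-- ===== CLAIM (what is proved, stated in full; the proofs are below) =====
def Claim_equal_build_multi_frame_page : Prop := ∀ (row : Int) (col : Int) (query : String), Dom_build_multi_frame_page row col query → Spec_build_multi_frame_page row col query (build_multi_frame_page row col query)

-- ===== LEMMAS AND PROOFS =====

-- folding "append a constant string" over a list appends that string length-many times
theorem foldl_append_const (s : String) : ∀ (l : List Int) (init : String),
    l.foldl (fun acc _ => acc ++ s) init = init ++ strRep s l.length := by
  intro l
  induction l with
  | nil => intro init; simp [strRep]
  | cons x xs ih =>
      intro init
      simp only [List.foldl_cons, List.length_cons, ih, strRep]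
      simp [String.append_assoc]

-- ===== VERDICT (by name: the statement is the Claim_ definition above) =====

theorem build_multi_frame_page_spec : Claim_equal_build_multi_frame_page := by
  intro row col query _
  unfold Spec_build_multi_frame_page build_multi_frame_page build_multi_frame_page_alt strMul
  simp only []
  have hbody : (fun (page : String) (_ : Int) =>
      (PySem.List.pyRange 0 col 1).foldl (fun page _ =>
        page ++ ("<td><iframe src='/?" ++ query ++ "' style='width:100%; height: 100%'></iframe></td>")) (page ++ "<tr>") ++ "</tr>\n")
      = (fun (page : String) (_ : Int) =>
      page ++ ("<tr>" ++ strRep ("<td><iframe src='/?" ++ query ++ "' style='width:100%; height: 100%'></iframe></td>") col.toNat ++ "</tr>\n")) := by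
    funext p x
    rw [foldl_append_const]
    simp [String.append_assoc, PySem.List.length_pyRange_one]
  rw [hbody, foldl_append_const]
  simp [String.append_assoc, PySem.List.length_pyRange_one]
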